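-- pv_equiv track=rewrite | github.com/vzucchetti/analysis-iris-plant | main.py | countSamples
-- ===== SOURCE A (Python) =====
-- def countSamples(sample, species):
--     count0 = 0
--     count1 = 0
--     count2 = 0
--     for item in sample:
--         if species[0] in item:
--             count0 += 1
--         elif species[1] in item:
--             count1 += 1
--         else:
--             count2 += 1
--     return [count0, count1, count2]
-- ===== SOURCE B (Python) =====
-- def countSamples(sample, species):
--     count0 = sum(1 for item in sample if species[0] in item)
--     count1 = sum(1 for item in sample if species[0] not in item and species[1] in item)
--     return [count0, count1, len(sample) - count0 - count1]
-- ===== Notes on version B (the rewrite author's own statement) =====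
-- stated objective: simpler
-- what changed: Replaces the single branching loop with three independent per-species counts: two substring-filter passes (the second guarded to preserve elif priority) and the third obtained by complement instead of a scan.
import Mathlib
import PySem

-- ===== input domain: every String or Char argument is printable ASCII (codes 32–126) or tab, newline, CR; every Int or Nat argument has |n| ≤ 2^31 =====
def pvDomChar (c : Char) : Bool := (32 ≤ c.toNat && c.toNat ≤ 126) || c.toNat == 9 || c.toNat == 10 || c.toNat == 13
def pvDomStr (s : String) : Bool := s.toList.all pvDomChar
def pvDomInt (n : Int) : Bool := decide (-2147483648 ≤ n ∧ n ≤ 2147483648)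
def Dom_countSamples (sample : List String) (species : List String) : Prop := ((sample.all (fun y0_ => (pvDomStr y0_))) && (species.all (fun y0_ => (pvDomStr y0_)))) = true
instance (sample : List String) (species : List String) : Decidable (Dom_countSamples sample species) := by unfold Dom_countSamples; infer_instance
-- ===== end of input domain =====

-- B computes each species count as an independent filter pass (third by complement) instead of one branching loop; objective: simpler.


-- ===== PORT A =====
def countSamples (sample : List String) (species : List String) : List Int :=
  let r := sample.foldl (fun (c : Int × Int × Int) item =>
    if PySem.Str.isIn (PySem.List.pyGetD species 0 "") item then (c.1 + 1, c.2.1, c.2.2)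
    else if PySem.Str.isIn (PySem.List.pyGetD species 1 "") item then (c.1, c.2.1 + 1, c.2.2)
    else (c.1, c.2.1, c.2.2 + 1)) (0, 0, 0)
  [r.1, r.2.1, r.2.2]

-- ===== PORT B =====
def countSamples_alt (sample : List String) (species : List String) : List Int :=
  let count0 : Int := sample.countP (fun item => PySem.Str.isIn (PySem.List.pyGetD species 0 "") item)
  let count1 : Int := sample.countP (fun item =>
      !PySem.Str.isIn (PySem.List.pyGetD species 0 "") item
      && PySem.Str.isIn (PySem.List.pyGetD species 1 "") item)
  [count0, count1, (sample.length : Int) - count0 - count1]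

-- ===== PRECONDITION & SPEC =====
-- Pre_ excludes exactly the inputs on which Python A raises IndexError: some item of a nonempty
-- sample forces indexing species[0] (species empty) or species[1] (species of length 1 and some
-- item not containing species[0]).
def Pre_countSamples (sample : List String) (species : List String) : Prop :=
  sample = [] ∨ 2 ≤ species.length ∨
    (species.length = 1 ∧ ∀ item ∈ sample, PySem.Str.isIn (PySem.List.pyGetD species 0 "") item = true)
instance (sample : List String) (species : List String) : Decidable (Pre_countSamples sample species) := by unfold Pre_countSamples; infer_instance
def pvWitness_countSamples : List String × List String := (["setosa sample", "virginica x"], ["setosa", "virginica", "versicolor"])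
def Spec_countSamples (sample : List String) (species : List String) (out : List Int) : Prop := out = countSamples_alt sample species
instance (sample : List String) (species : List String) (out : List Int) : Decidable (Spec_countSamples sample species out) := by unfold Spec_countSamples; infer_instance

-- ===== CLAIM (what is proved, stated in full; the proofs are below) =====
def Claim_equal_countSamples : Prop := ∀ (sample : List String) (species : List String), Dom_countSamples sample species → Pre_countSamples sample species → Spec_countSamples sample species (countSamples sample species)

-- ===== LEMMAS AND PROOFS =====

-- The branching fold accumulates exactly the three predicate counts (accumulator generalized).
theorem countSamples_fold_eq (sample : List String) (p0 p1 : String → Bool) (a b c : Int) :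
    sample.foldl (fun (s : Int × Int × Int) item =>
      if p0 item then (s.1 + 1, s.2.1, s.2.2)
      else if p1 item then (s.1, s.2.1 + 1, s.2.2)
      else (s.1, s.2.1, s.2.2 + 1)) (a, b, c)
    = (a + sample.countP p0,
       b + sample.countP (fun item => !p0 item && p1 item),
       c + sample.countP (fun item => !p0 item && !p1 item)) := by
  induction sample generalizing a b c with
  | nil => simp
  | cons h t ih =>
    by_cases h0 : p0 h
    · simp [List.foldl_cons, h0, ih]
      ring_nf
    · by_cases h1 : p1 h
      · simp [List.foldl_cons, h0, h1, ih]
        ring_nf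
      · simp [List.foldl_cons, h0, h1, ih]
        ring_nf

-- The residual count is the complement of the two predicate counts.
theorem countP_partition (sample : List String) (p0 p1 : String → Bool) :
    (sample.countP p0 : Int)
      + sample.countP (fun item => !p0 item && p1 item)
      + sample.countP (fun item => !p0 item && !p1 item)
    = sample.length := by
  induction sample with
  | nil => simp
  | cons h t ih =>
    by_cases h0 : p0 h <;> by_cases h1 : p1 h <;>
      simp [h0, h1] <;> omega

-- ===== VERDICT (by name: the statement is the Claim_ definition above) =====
theorem countSamples_spec : Claim_equal_countSamples := by
  intro sample species _ _
  show _ = _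
  unfold countSamples countSamples_alt
  simp only [countSamples_fold_eq, zero_add]
  have := countP_partition sample
    (fun item => PySem.Str.isIn (PySem.List.pyGetD species 0 "") item)
    (fun item => PySem.Str.isIn (PySem.List.pyGetD species 1 "") item)
  simp only [List.cons.injEq, and_true, true_and]
  omega
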